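-- pv_equiv track=rewrite | github.com/ZekeJin97/International-Advisor | main.py | truncate_texts
-- ===== SOURCE A (Python) =====
-- from typing import List
--
-- def truncate_texts(texts: List[str], max_tokens=2000):
--     total = 0
--     output = []
--     for t in texts:
--         tokens = len(t.split())
--         if total + tokens > max_tokens:
--             break
--         output.append(t)
--         total += tokens
--     return output
-- ===== SOURCE B (Python) =====
-- def truncate_texts(texts, max_tokens=2000):
--     # Pass 1: prefix-sum table of word counts.
--     sums = [len(t.split()) for t in texts]
--     for i in range(1, len(sums)):
--         sums[i] += sums[i - 1]
--     # Pass 2: length of the keepable prefix, then slice.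
--     keep = 0
--     while keep < len(sums) and sums[keep] <= max_tokens:
--         keep += 1
--     return texts[:keep]
-- ===== Notes on version B (the rewrite author's own statement) =====
-- stated objective: alternative
-- what changed: B precomputes a prefix-sum table of word counts, then finds the keepable prefix length in a separate pass and returns a slice, instead of A's fused loop that accumulates a total and appends with an early break.
import Mathlib
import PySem

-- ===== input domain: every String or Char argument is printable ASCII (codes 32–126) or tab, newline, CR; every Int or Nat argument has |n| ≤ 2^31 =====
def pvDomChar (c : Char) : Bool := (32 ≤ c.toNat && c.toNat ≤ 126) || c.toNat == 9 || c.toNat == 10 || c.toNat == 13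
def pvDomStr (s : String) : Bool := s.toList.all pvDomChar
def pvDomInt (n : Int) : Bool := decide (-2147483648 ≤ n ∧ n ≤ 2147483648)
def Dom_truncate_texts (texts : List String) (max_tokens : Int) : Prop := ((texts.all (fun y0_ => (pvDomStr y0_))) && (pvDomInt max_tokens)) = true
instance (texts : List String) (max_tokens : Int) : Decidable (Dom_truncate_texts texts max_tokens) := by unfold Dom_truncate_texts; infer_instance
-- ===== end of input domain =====

-- B replaces A's fused accumulate-and-break loop by a prefix-sum table plus a
-- separate keep-length scan and a slice (objective: alternative decomposition).

-- ===== PORT A =====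
-- A's loop: accumulate `total`, append until the budget would be exceeded (break = drop the rest).
def truncate_texts_go (max_tokens : Int) (total : Int) : List String → List String
  | [] => []
  | t :: rest =>
    let tokens : Int := (PySem.Str.split₀ t).length
    if total + tokens > max_tokens then []
    else t :: truncate_texts_go max_tokens (total + tokens) rest

def truncate_texts (texts : List String) (max_tokens : Int) : List String :=
  truncate_texts_go max_tokens 0 texts

-- ===== PORT B =====
-- Source B pass 1: in-place running sums over the word-count table.
def pvPrefixSums (acc : Int) : List Int → List Int
  | [] => []
  | c :: cs => (acc + c) :: pvPrefixSums (acc + c) cs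

-- Source B pass 2: the while loop counting how many prefix sums fit the budget.
def pvKeepLen (max_tokens : Int) : List Int → Nat
  | [] => 0
  | s :: rest => if s ≤ max_tokens then pvKeepLen max_tokens rest + 1 else 0

def truncate_texts_alt (texts : List String) (max_tokens : Int) : List String :=
  let sums := pvPrefixSums 0 (texts.map (fun t => ((PySem.Str.split₀ t).length : Int)))
  texts.take (pvKeepLen max_tokens sums)

-- ===== PRECONDITION & SPEC =====
def Spec_truncate_texts (texts : List String) (max_tokens : Int) (out : List String) : Prop := out = truncate_texts_alt texts max_tokens
instance (texts : List String) (max_tokens : Int) (out : List String) : Decidable (Spec_truncate_texts texts max_tokens out) := by unfold Spec_truncate_texts; infer_instance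

-- ===== CLAIM (what is proved, stated in full; the proofs are below) =====
def Claim_equal_truncate_texts : Prop := ∀ (texts : List String) (max_tokens : Int), Dom_truncate_texts texts max_tokens → Spec_truncate_texts texts max_tokens (truncate_texts texts max_tokens)

-- ===== LEMMAS AND PROOFS =====
theorem truncate_go_eq (max_tokens : Int) (texts : List String) :
    ∀ total : Int,
      truncate_texts_go max_tokens total texts =
        texts.take (pvKeepLen max_tokens
          (pvPrefixSums total (texts.map (fun t => ((PySem.Str.split₀ t).length : Int))))) := by
  induction texts with
  | nil => intro total; rfl
  | cons t rest ih =>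
    intro total
    simp only [truncate_texts_go, List.map, pvPrefixSums, pvKeepLen]
    by_cases h : total + ((PySem.Str.split₀ t).length : Int) > max_tokens
    · rw [if_pos h, if_neg (by omega)]
      rfl
    · rw [if_neg h, if_pos (by omega), List.take_succ_cons, ih (total + ((PySem.Str.split₀ t).length : Int))]

-- ===== VERDICT (by name: the statement is the Claim_ definition above) =====
theorem truncate_texts_spec : Claim_equal_truncate_texts := by
  intro texts max_tokens _
  unfold Spec_truncate_texts truncate_texts truncate_texts_alt
  exact truncate_go_eq max_tokens texts 0
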